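-- pv_equiv track=rewrite | github.com/RyanKHawkins/CryptoWizard | string_formatting.py | group_characters
-- ===== SOURCE A (Python) =====
-- def group_characters(string, num=3, null='x'):
--     grouped_string = ""
--
--     i = len(string)
--     j = 0
--     while j < i:
--         for k in range(num):
--             if j < i:
--                 grouped_string += string[j]
--                 j += 1
--             else:
--                 grouped_string += null
--         grouped_string += " "
--     return grouped_string
-- ===== SOURCE B (Python) =====
-- def group_characters(string, num=3, null='x'):
--     parts = []
--     n = len(string)
--     j = 0
--     while j < n:
--         block = string[j:j+num]
--         parts.append(block + null * (num - len(block)) + " ")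
--         j += num
--     return "".join(parts)
-- ===== Notes on version B (the rewrite author's own statement) =====
-- stated objective: simpler
-- what changed: B iterates block-wise: it slices string[j:j+num], pads once with null*(num-len(block)) and joins the collected parts, replacing A's per-character inner for-loop and repeated string concatenation.
import Mathlib
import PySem

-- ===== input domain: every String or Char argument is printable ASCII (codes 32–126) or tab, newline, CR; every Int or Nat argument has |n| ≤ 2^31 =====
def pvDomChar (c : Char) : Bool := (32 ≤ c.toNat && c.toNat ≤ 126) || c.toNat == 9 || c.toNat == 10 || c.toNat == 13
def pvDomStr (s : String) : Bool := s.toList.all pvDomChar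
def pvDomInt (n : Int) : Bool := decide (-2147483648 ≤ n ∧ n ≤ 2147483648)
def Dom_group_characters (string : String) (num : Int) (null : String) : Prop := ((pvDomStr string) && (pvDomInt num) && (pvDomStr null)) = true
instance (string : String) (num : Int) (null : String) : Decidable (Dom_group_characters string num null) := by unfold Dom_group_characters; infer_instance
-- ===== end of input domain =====

-- B groups block-wise (slice + one padding step + join) instead of A's per-character inner loop; objective: simpler.

-- ===== PORT A =====
-- inner `for k in range(num)` of A: state is (grouped_string, j)
def groupA_inner (chars null : List Char) (n : Nat) : Nat → List Char × Nat → List Char × Nat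
  | 0, p => p
  | Nat.succ k, (acc, j) =>
      groupA_inner chars null n k
        (if j < n then (acc ++ [chars.getD j ' '], j + 1) else (acc ++ null, j))

-- j never decreases through the inner loop (needed for termination of the outer loop)
theorem groupA_inner_snd_ge (chars null : List Char) (n : Nat) :
    ∀ (k : Nat) (acc : List Char) (j : Nat), j ≤ (groupA_inner chars null n k (acc, j)).2 := by
  intro k
  induction k with
  | zero => intro acc j; simp [groupA_inner]
  | succ k ih =>
      intro acc j
      simp only [groupA_inner]
      split
      · exact Nat.le_trans (Nat.le_succ j) (ih _ (j + 1))
      · exact ih _ j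

theorem groupA_inner_snd_gt (chars null : List Char) (n : Nat) (k : Nat) (acc : List Char)
    (j : Nat) (hj : j < n) (hk : 1 ≤ k) : j < (groupA_inner chars null n k (acc, j)).2 := by
  cases k with
  | zero => omega
  | succ k =>
      simp only [groupA_inner, if_pos hj]
      exact Nat.lt_of_lt_of_le (Nat.lt_succ_self j) (groupA_inner_snd_ge chars null n k _ (j + 1))

-- outer `while j < i` of A; Python diverges when num ≤ 0 and the string is nonempty
-- (such inputs are outside Pre_), so the loop guard also requires 1 ≤ num.
def groupA_loop (chars null : List Char) (num : Int) (j : Nat) (acc : List Char) : List Char :=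
  if h : j < chars.length ∧ 1 ≤ num then
    let p := groupA_inner chars null chars.length num.toNat (acc, j)
    groupA_loop chars null num p.2 (p.1 ++ [' '])
  else acc
termination_by chars.length - j
decreasing_by
  have := groupA_inner_snd_gt chars null chars.length num.toNat acc j h.1 (by omega)
  omega

def group_characters (string : String) (num : Int) (null : String) : String :=
  String.mk (groupA_loop string.toList null.toList num 0 [])

-- ===== PORT B =====
-- Python string repetition `null * m`
def pyStrMul (s : List Char) : Nat → List Char
  | 0 => []
  | Nat.succ m => s ++ pyStrMul s m

-- B's `while j < n` loop collecting `parts`; same guard remark as for A (num ≤ 0 diverges in Python)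
def groupB_loop (chars null : List Char) (num : Int) (j : Nat) (parts : List (List Char)) :
    List (List Char) :=
  if h : j < chars.length ∧ 1 ≤ num then
    let block := (chars.drop j).take num.toNat
    groupB_loop chars null num (j + num.toNat)
      (parts ++ [block ++ pyStrMul null (num.toNat - block.length) ++ [' ']])
  else parts
termination_by chars.length - j
decreasing_by omega

def group_characters_alt (string : String) (num : Int) (null : String) : String :=
  String.mk ((groupB_loop string.toList null.toList num 0 []).flatMap id)

-- ===== PRECONDITION & SPEC =====
-- Pre_ excludes num ≤ 0 with a nonempty string: there Python A (and B) loops forever and returns nothing.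
def Pre_group_characters (string : String) (num : Int) (null : String) : Prop :=
  1 ≤ num ∨ string = ""
instance (string : String) (num : Int) (null : String) : Decidable (Pre_group_characters string num null) := by unfold Pre_group_characters; infer_instance

def pvWitness_group_characters : String × Int × String := ("abcde", 3, "x")

def Spec_group_characters (string : String) (num : Int) (null : String) (out : String) : Prop := out = group_characters_alt string num null
instance (string : String) (num : Int) (null : String) (out : String) : Decidable (Spec_group_characters string num null out) := by unfold Spec_group_characters; infer_instance

-- ===== CLAIM (what is proved, stated in full; the proofs are below) =====
def Claim_equal_group_characters : Prop := ∀ (string : String) (num : Int) (null : String), Dom_group_characters string num null → Pre_group_characters string num null → Spec_group_characters string num null (group_characters string num null)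

-- ===== LEMMAS AND PROOFS =====

-- characterisation of A's inner loop: it emits the block starting at j and then pads with null
theorem groupA_inner_spec (chars null : List Char) :
    ∀ (k j : Nat) (acc : List Char),
      groupA_inner chars null chars.length k (acc, j) =
        (acc ++ (chars.drop j).take k ++ pyStrMul null (k - ((chars.drop j).take k).length),
          j + ((chars.drop j).take k).length) := by
  intro k
  induction k with
  | zero => intro j acc; simp [groupA_inner, pyStrMul]
  | succ k ih =>
      intro j acc
      by_cases hj : j < chars.length
      · have hdrop : chars.drop j = chars[j] :: chars.drop (j + 1) :=
          List.drop_eq_getElem_cons hj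
        have hgetD : chars.getD j ' ' = chars[j] := List.getD_eq_getElem chars ' ' hj
        simp only [groupA_inner, if_pos hj, hgetD, ih (j + 1) (acc ++ [chars[j]]), hdrop,
          List.take_succ_cons, List.length_cons]
        have hsub : k + 1 - ((List.take k (List.drop (j + 1) chars)).length + 1)
            = k - (List.take k (List.drop (j + 1) chars)).length := by omega
        rw [hsub]
        simp only [Prod.mk.injEq]
        exact ⟨by simp, by omega⟩
      · have hdrop : chars.drop j = [] := List.drop_eq_nil_of_le (by omega)
        simp only [groupA_inner, if_neg hj, ih j (acc ++ null), hdrop, List.take_nil,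
          List.length_nil, List.append_nil, Nat.sub_zero, pyStrMul]
        simp
  
-- the two loops agree whenever A's accumulated string is the flattening of B's parts
theorem loop_eq (chars null : List Char) (num : Int) (h1 : 1 ≤ num) :
    ∀ (f j : Nat), chars.length - j ≤ f → ∀ (accA : List Char) (parts : List (List Char)),
      accA = parts.flatMap id →
      groupA_loop chars null num j accA = (groupB_loop chars null num j parts).flatMap id := by
  intro f
  induction f with
  | zero =>
      intro j hf accA parts hacc
      have hj : ¬ (j < chars.length) := by omega
      rw [groupA_loop, groupB_loop]
      simp only [hj, false_and, dif_neg, not_false_iff]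
      exact hacc
  | succ f ih =>
      intro j hf accA parts hacc
      by_cases hj : j < chars.length
      · have hnum : 1 ≤ num.toNat := by omega
        rw [groupA_loop, groupB_loop]
        simp only [dif_pos (And.intro hj h1)]
        rw [groupA_inner_spec]
        set block := (chars.drop j).take num.toNat with hblock
        have hlen : block.length = min num.toNat (chars.length - j) := by
          simp [hblock]
        by_cases hfit : j + num.toNat ≤ chars.length
        · have hbl : block.length = num.toNat := by omega
          have hj2 : j + block.length = j + num.toNat := by omega
          rw [hj2]
          exact ih (j + num.toNat) (by omega) _ _ (by simp [hacc, List.append_assoc])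
        · -- partial final block: A stops at j + block.length = chars.length, B at j + num.toNat ≥ chars.length
          have hbl : j + block.length = chars.length := by omega
          rw [hbl, groupA_loop, groupB_loop]
          have hA : ¬ (chars.length < chars.length ∧ 1 ≤ num) := by omega
          have hB : ¬ (j + num.toNat < chars.length ∧ 1 ≤ num) := by omega
          simp only [dif_neg hA, dif_neg hB]
          simp [hacc, List.append_assoc]
      · rw [groupA_loop, groupB_loop]
        simp only [hj, false_and, dif_neg, not_false_iff]
        exact hacc

-- ===== VERDICT (by name: the statement is the Claim_ definition above) =====
theorem group_characters_spec : Claim_equal_group_characters := by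
  intro string num null _ hpre
  unfold Spec_group_characters group_characters group_characters_alt
  rcases hpre with h1 | hs
  · rw [loop_eq string.toList null.toList num h1 string.toList.length 0 (by omega) [] [] rfl]
  · subst hs
    rw [groupA_loop, groupB_loop]
    simp
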